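-- pv_equiv track=rewrite | github.com/dazzelll/fintech-athon | backend/engines.py | calculate_wealth_age
-- ===== SOURCE A (Python) =====
-- def calculate_wealth_age(total_wealth, real_age, health_score):
--     benchmarks = {
--         25: 15000, 30: 60000, 35: 130000, 40: 250000,
--         45: 400000, 50: 600000, 55: 900000, 60: 1300000
--     }
--     wealth_age = real_age
--     for age, benchmark in sorted(benchmarks.items()):
--         if total_wealth >= benchmark: wealth_age = age
--
--     health_bonus = round((health_score - 50) / 10)
--     return max(18, wealth_age + health_bonus)
-- ===== SOURCE B (Python) =====
-- _THRESHOLDS = [15000, 60000, 130000, 250000, 400000, 600000, 900000, 1300000]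
-- _AGES = [25, 30, 35, 40, 45, 50, 55, 60]
--
-- def _bisect_right(xs, x):
--     lo, hi = 0, len(xs)
--     while lo < hi:
--         mid = (lo + hi) // 2
--         if x < xs[mid]:
--             hi = mid
--         else:
--             lo = mid + 1
--     return lo
--
-- def calculate_wealth_age(total_wealth, real_age, health_score):
--     idx = _bisect_right(_THRESHOLDS, total_wealth)
--     wealth_age = real_age if idx == 0 else _AGES[idx - 1]
--     health_bonus = round((health_score - 50) / 10)
--     return max(18, wealth_age + health_bonus)
-- ===== Notes on version B (the rewrite author's own statement) =====
-- stated objective: alternative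
-- what changed: Replaces the linear scan over all eight sorted (age, benchmark) pairs by a binary search (bisect_right) over a precomputed threshold list paired with a parallel age table; the round()/max() arithmetic is kept verbatim.
import Mathlib
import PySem

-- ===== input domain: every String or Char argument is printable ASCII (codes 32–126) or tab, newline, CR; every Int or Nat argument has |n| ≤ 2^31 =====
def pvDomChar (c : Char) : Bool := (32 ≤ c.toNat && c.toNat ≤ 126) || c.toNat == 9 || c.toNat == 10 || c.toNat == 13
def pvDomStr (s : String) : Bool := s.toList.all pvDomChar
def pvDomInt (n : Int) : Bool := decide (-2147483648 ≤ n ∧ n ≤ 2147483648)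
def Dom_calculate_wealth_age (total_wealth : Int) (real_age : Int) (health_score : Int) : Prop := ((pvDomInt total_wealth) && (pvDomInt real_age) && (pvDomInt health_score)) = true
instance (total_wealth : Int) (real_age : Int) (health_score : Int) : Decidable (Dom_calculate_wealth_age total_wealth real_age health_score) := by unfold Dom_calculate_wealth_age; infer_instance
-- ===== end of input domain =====

-- ===== PORT A =====
-- round((d)/10) in Python (banker's rounding of a float); exact as integer half-to-even here
-- because every true tie d = 10*q+5 gives a double exactly equal to q+0.5 for |d| ≤ 2^31+50.
def pyRoundDiv10 (d : Int) : Int :=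
  let q := PySem.Int.floordiv d 10
  let r := PySem.Int.mod d 10
  if 2 * r < 10 then q else if 2 * r > 10 then q + 1 else if q % 2 = 0 then q else q + 1

def calculate_wealth_age (total_wealth : Int) (real_age : Int) (health_score : Int) : Int :=
  let benchmarks : List (Int × Int) :=
    [(25, 15000), (30, 60000), (35, 130000), (40, 250000),
     (45, 400000), (50, 600000), (55, 900000), (60, 1300000)]  -- sorted(benchmarks.items())
  let wealth_age := benchmarks.foldl (fun wa p => if total_wealth ≥ p.2 then p.1 else wa) real_age
  let health_bonus := pyRoundDiv10 (health_score - 50)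
  max 18 (wealth_age + health_bonus)

-- ===== PORT B =====
-- Source B's _bisect_right while-loop; fuel = len(xs) bounds the iteration count (the
-- interval [lo,hi) strictly shrinks each step), so this computes exactly the loop's result.
-- xs[mid] with lo ≤ mid < hi ≤ len xs is always in range, so getD is exact here.
def bisectLoop (xs : List Int) (x : Int) : Nat → Nat → Nat → Nat
  | 0, lo, _ => lo
  | fuel + 1, lo, hi =>
    if lo < hi then
      if x < xs.getD ((lo + hi) / 2) 0 then bisectLoop xs x fuel lo ((lo + hi) / 2)
      else bisectLoop xs x fuel ((lo + hi) / 2 + 1) hi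
    else lo

def bisect_right (xs : List Int) (x : Int) : Nat :=
  bisectLoop xs x xs.length 0 xs.length

def calculate_wealth_age_alt (total_wealth : Int) (real_age : Int) (health_score : Int) : Int :=
  let thresholds : List Int := [15000, 60000, 130000, 250000, 400000, 600000, 900000, 1300000]
  let ages : List Int := [25, 30, 35, 40, 45, 50, 55, 60]
  let idx := bisect_right thresholds total_wealth
  let wealth_age := if idx = 0 then real_age else ages.getD (idx - 1) 0
  let health_bonus := pyRoundDiv10 (health_score - 50)
  max 18 (wealth_age + health_bonus)

-- ===== PRECONDITION & SPEC =====
def Spec_calculate_wealth_age (total_wealth : Int) (real_age : Int) (health_score : Int) (out : Int) : Prop := out = calculate_wealth_age_alt total_wealth real_age health_score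
instance (total_wealth : Int) (real_age : Int) (health_score : Int) (out : Int) : Decidable (Spec_calculate_wealth_age total_wealth real_age health_score out) := by unfold Spec_calculate_wealth_age; infer_instance

-- ===== CLAIM (what is proved, stated in full; the proofs are below) =====
def Claim_equal_calculate_wealth_age : Prop := ∀ (total_wealth : Int) (real_age : Int) (health_score : Int), Dom_calculate_wealth_age total_wealth real_age health_score → Spec_calculate_wealth_age total_wealth real_age health_score (calculate_wealth_age total_wealth real_age health_score)

-- ===== LEMMAS AND PROOFS =====

-- the wealth-age part: A's linear scan over the sorted benchmarks equals B's binary search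
theorem wealth_age_key (tw ra : Int) :
    ([((25:Int),(15000:Int)), (30, 60000), (35, 130000), (40, 250000),
      (45, 400000), (50, 600000), (55, 900000), (60, 1300000)].foldl
        (fun wa p => if tw ≥ p.2 then p.1 else wa) ra) =
    (let idx := bisect_right [15000, 60000, 130000, 250000, 400000, 600000, 900000, 1300000] tw
     if idx = 0 then ra else ([25, 30, 35, 40, 45, 50, 55, 60] : List Int).getD (idx - 1) 0) := by
  norm_num [bisect_right, bisectLoop, List.foldl]
  simp only [← not_lt]
  split_ifs <;> first | omega | (norm_num; try contradiction; try omega)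

-- ===== VERDICT (by name: the statement is the Claim_ definition above) =====
theorem calculate_wealth_age_spec : Claim_equal_calculate_wealth_age := by
  intro tw ra hs _
  simp only [Spec_calculate_wealth_age, calculate_wealth_age, calculate_wealth_age_alt]
  rw [wealth_age_key]
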